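-- pv_equiv track=rewrite | github.com/microsoft/social-reasoning-bench | packages/sage-data-gen/sage_data_gen/form_filling/utils.py | fix_class_name_starting_with_number
-- ===== SOURCE A (Python) =====
-- def fix_class_name_starting_with_number(class_name: str) -> str:
--     """Fix class names that start with numbers by moving digits to the end.
--
--     Examples:
--         "123Application" -> "Application123"
--         "2025TaxForm" -> "TaxForm2025"
--         "ValidName" -> "ValidName"
--     """
--     if not class_name or not class_name[0].isdigit():
--         return class_name
--
--     leading_digits = ""
--     rest = ""
--     for char in class_name:
--         if char.isdigit() and rest == "":
--             leading_digits += char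
--         else:
--             rest += char
--
--     if not rest:
--         return f"Form{leading_digits}"
--     return f"{rest}{leading_digits}"
-- ===== SOURCE B (Python) =====
-- def fix_class_name_starting_with_number(class_name: str) -> str:
--     # Split at the first non-digit position, then rearrange by slicing.
--     i = next((i for i, c in enumerate(class_name) if not c.isdigit()), len(class_name))
--     digits, rest = class_name[:i], class_name[i:]
--     if rest:
--         return rest + digits
--     return "Form" + digits if digits else class_name
-- ===== Notes on version B (the rewrite author's own statement) =====
-- stated objective: simpler
-- what changed: Replaces the character-by-character accumulation loop with two string variables by a single first-non-digit index lookup and two slices, rearranged by concatenation.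
import Mathlib
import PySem

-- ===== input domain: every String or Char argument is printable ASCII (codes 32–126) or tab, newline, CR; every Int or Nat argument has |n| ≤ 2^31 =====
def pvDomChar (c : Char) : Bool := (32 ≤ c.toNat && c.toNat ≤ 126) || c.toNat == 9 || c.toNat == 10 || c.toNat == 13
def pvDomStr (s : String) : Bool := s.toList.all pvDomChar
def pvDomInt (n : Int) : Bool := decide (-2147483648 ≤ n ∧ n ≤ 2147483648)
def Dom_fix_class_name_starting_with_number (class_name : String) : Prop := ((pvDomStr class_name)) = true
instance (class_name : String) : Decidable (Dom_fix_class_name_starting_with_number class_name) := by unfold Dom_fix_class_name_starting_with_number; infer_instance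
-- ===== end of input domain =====

-- B replaces A's accumulation loop by a first-non-digit index and two slices (objective: simpler).
-- ===== PORT A =====
-- literal port of A: guard (empty or first char not a digit), then a fold over the chars
-- accumulating (leading_digits, rest); class_name[0] is pyGet? cs 0.
def fix_class_name_starting_with_number (class_name : String) : String :=
  let cs := class_name.toList
  if cs.isEmpty || !((PySem.List.pyGet? cs 0).elim false PySem.Chars.isdigit) then class_name
  else
    let st := cs.foldl
      (fun (st : List Char × List Char) ch =>
        if PySem.Chars.isdigit ch && st.2.isEmpty then (st.1 ++ [ch], st.2)
        else (st.1, st.2 ++ [ch])) ([], [])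
    if st.2.isEmpty then String.ofList ("Form".toList ++ st.1)
    else String.ofList (st.2 ++ st.1)

-- ===== PORT B =====
-- literal port of Source B: i = first index whose char is not a digit (default len(class_name)),
-- digits = class_name[:i], rest = class_name[i:] (slices with 0 ≤ i ≤ len are take/drop, exact)
def fix_class_name_starting_with_number_alt (class_name : String) : String :=
  let cs := class_name.toList
  let i := cs.findIdx (fun c => !(PySem.Chars.isdigit c))
  let digits := cs.take i
  let rest := cs.drop i
  if !rest.isEmpty then String.ofList (rest ++ digits)
  else if !digits.isEmpty then String.ofList ("Form".toList ++ digits)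
  else class_name

-- ===== PRECONDITION & SPEC =====
def Spec_fix_class_name_starting_with_number (class_name : String) (out : String) : Prop := out = fix_class_name_starting_with_number_alt class_name
instance (class_name : String) (out : String) : Decidable (Spec_fix_class_name_starting_with_number class_name out) := by unfold Spec_fix_class_name_starting_with_number; infer_instance

-- ===== CLAIM (what is proved, stated in full; the proofs are below) =====
def Claim_equal_fix_class_name_starting_with_number : Prop := ∀ (class_name : String), Dom_fix_class_name_starting_with_number class_name → Spec_fix_class_name_starting_with_number class_name (fix_class_name_starting_with_number class_name)

-- ===== LEMMAS AND PROOFS =====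

-- ===== VERDICT (by name: the statement is the Claim_ definition above) =====
-- the fold, once rest is nonempty, just appends every remaining char to rest
theorem foldA_rest_ne (cs : List Char) (d r : List Char) (hr : r ≠ []) :
    cs.foldl (fun (st : List Char × List Char) ch =>
        if PySem.Chars.isdigit ch && st.2.isEmpty then (st.1 ++ [ch], st.2)
        else (st.1, st.2 ++ [ch])) (d, r) = (d, r ++ cs) := by
  induction cs generalizing r with
  | nil => simp
  | cons c cs ih =>
    have h2 : r.isEmpty = false := by simpa [List.isEmpty_iff] using hr
    rw [List.foldl_cons]
    simp only [h2, Bool.and_false, Bool.false_eq_true, if_false]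
    rw [ih (r ++ [c]) (by simp)]
    simp

-- the fold from an empty rest computes the takeWhile/dropWhile split of the digit prefix
theorem foldA_eq_span (cs : List Char) (d : List Char) :
    cs.foldl (fun (st : List Char × List Char) ch =>
        if PySem.Chars.isdigit ch && st.2.isEmpty then (st.1 ++ [ch], st.2)
        else (st.1, st.2 ++ [ch])) (d, []) =
      (d ++ cs.takeWhile PySem.Chars.isdigit, cs.dropWhile PySem.Chars.isdigit) := by
  induction cs generalizing d with
  | nil => simp
  | cons c cs ih =>
    by_cases hc : PySem.Chars.isdigit c = true
    · rw [List.foldl_cons]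
      simp only [hc, List.isEmpty_nil, Bool.and_self, if_true]
      rw [ih (d ++ [c])]
      simp [hc]
    · have hc' : PySem.Chars.isdigit c = false := by simpa using hc
      rw [List.foldl_cons]
      simp only [hc', List.isEmpty_nil, Bool.false_and, Bool.false_eq_true, if_false]
      rw [foldA_rest_ne cs d ([] ++ [c]) (by simp)]
      simp [hc']

-- take/drop at the first non-digit index are takeWhile/dropWhile of the digit prefix
theorem take_findIdx_eq (cs : List Char) :
    cs.take (cs.findIdx (fun c => !(PySem.Chars.isdigit c))) = cs.takeWhile PySem.Chars.isdigit ∧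
    cs.drop (cs.findIdx (fun c => !(PySem.Chars.isdigit c))) = cs.dropWhile PySem.Chars.isdigit := by
  induction cs with
  | nil => simp
  | cons c cs ih =>
    by_cases hc : PySem.Chars.isdigit c = true
    · simp [List.findIdx_cons, hc, ih.1, ih.2]
    · simp [List.findIdx_cons, hc]

-- ===== VERDICT (by name: the statement is the Claim_ definition above) =====
theorem fix_class_name_starting_with_number_spec : Claim_equal_fix_class_name_starting_with_number := by
  intro class_name _
  unfold Spec_fix_class_name_starting_with_number
  unfold fix_class_name_starting_with_number fix_class_name_starting_with_number_alt
  obtain ⟨ht, hd⟩ := take_findIdx_eq class_name.toList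
  by_cases hne : class_name.toList = []
  · simp [hne]
  · obtain ⟨c, cs, hcs⟩ := List.exists_cons_of_ne_nil hne
    rw [hcs] at ht hd
    have hget : PySem.List.pyGet? (c :: cs) (0 : Int) = some c := by
      simp [PySem.List.pyGet?, PySem.List.pyIdx?]
    by_cases hc : PySem.Chars.isdigit c = true
    · rw [hcs]
      dsimp only
      rw [ht, hd]
      simp only [hget, Option.elim, hc, Bool.not_true, List.isEmpty_cons, Bool.false_eq_true,
        if_false, Bool.or_false, foldA_eq_span, List.nil_append]
      by_cases hrest : (c :: cs).dropWhile PySem.Chars.isdigit = []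
      · have hdig : (c :: cs).takeWhile PySem.Chars.isdigit ≠ [] := by
          simp [hc]
        simp [hrest, hdig]
      · simp [List.isEmpty_iff, hrest]
    · have hc' : PySem.Chars.isdigit c = false := by simpa using hc
      have hrest : (c :: cs).dropWhile PySem.Chars.isdigit = c :: cs := by
        simp [hc']
      have htake : (c :: cs).takeWhile PySem.Chars.isdigit = [] := by
        simp [hc']
      rw [hcs]
      dsimp only
      rw [ht, hd, hrest, htake]
      simp [hc']
      rw [← hcs]
      exact String.ofList_toList.symm
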